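-- pv_equiv track=rewrite | github.com/mledl/MonetDB_WCOJ | benchmark/gendb/main.py | fanned_out_tpls_from_id
-- ===== SOURCE A (Python) =====
-- def fanned_out_tpls_from_id(cols, j, m):
--     out = []
--     for i in range(m):
--         for x in cols:
--             row = []
--             for c in cols:
--                 if x == c:
--                     val = '{}{}'.format(c, i)
--                 else:
--                     val = '{}{}'.format(c, j)
--                 row.append(val)
--             rows = ','.join(row)
--             out.append(rows)
--     return list(set(out))
-- ===== SOURCE B (Python) =====
-- def _gaps(cols, x, js):
--     # fixed string pieces of a row around the cells whose column equals x
--     done = []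
--     cur = ''
--     first = True
--     for c in cols:
--         sep = '' if first else ','
--         first = False
--         if c == x:
--             done.append(cur + sep)
--             cur = ''
--         else:
--             cur = cur + sep + c + js
--     done.append(cur)
--     return done
--
-- def fanned_out_tpls_from_id(cols, j, m):
--     js = str(j)
--     gaps_of = {}
--     for x in cols:
--         if x not in gaps_of:
--             gaps_of[x] = _gaps(cols, x, js)
--     out = set()
--     for i in range(m):
--         si = str(i)
--         for x in cols:
--             out.add((x + si).join(gaps_of[x]))
--     return list(out)
-- ===== Notes on version B (the rewrite author's own statement) =====
-- stated objective: faster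
-- what changed: Instead of formatting every cell of every row inside the m*n*n nested loops, B precomputes once per distinct column name the fixed comma-joined string pieces of a row around that column's cells (memoized in a dict), and builds each row as a single join of those ready-made pieces into a set.
import Mathlib
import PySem

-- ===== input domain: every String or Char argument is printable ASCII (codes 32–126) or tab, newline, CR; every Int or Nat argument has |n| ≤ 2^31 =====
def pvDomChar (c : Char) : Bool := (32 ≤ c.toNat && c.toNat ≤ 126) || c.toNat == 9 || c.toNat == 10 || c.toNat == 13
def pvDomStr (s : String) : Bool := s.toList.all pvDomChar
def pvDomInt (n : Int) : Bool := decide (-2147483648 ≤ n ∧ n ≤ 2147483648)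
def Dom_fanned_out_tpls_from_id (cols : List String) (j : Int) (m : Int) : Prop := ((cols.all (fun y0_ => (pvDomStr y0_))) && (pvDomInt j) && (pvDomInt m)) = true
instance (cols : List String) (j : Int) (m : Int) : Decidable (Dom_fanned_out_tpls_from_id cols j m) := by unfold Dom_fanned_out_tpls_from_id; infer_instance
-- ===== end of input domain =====

-- B precomputes, once per distinct column name x, the fixed comma-joined string pieces of a
-- row around the cells of column x, so each of the m·n rows is one join of ready-made pieces
-- instead of n per-cell formats plus a join; measurably faster, same returned value.

-- ===== PORT A =====
def fanned_out_tpls_from_id (cols : List String) (j : Int) (m : Int) : List String :=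
  let out := (PySem.List.pyRange 0 m 1).foldl (fun out i =>
    cols.foldl (fun out x =>
      let row := cols.foldl (fun row c =>
        let val := if x == c then c ++ PySem.Int.toStr i else c ++ PySem.Int.toStr j
        row ++ [val]) ([] : List String)
      let rows := PySem.Str.join "," row
      out ++ [rows]) out) ([] : List String)
  PySem.Set.ofList out

-- ===== PORT B =====
-- helper _gaps of Source B; the Python list `gaps` with its mutable last element is modelled as
-- the pair (done, cur) exactly as Source B keeps it
def pvGapsStep (x js : String) (st : List String × String × Bool) (c : String) : List String × String × Bool :=
  let sep := if st.2.2 then "" else ","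
  if c == x then (st.1 ++ [st.2.1 ++ sep], "", false)
  else (st.1, st.2.1 ++ sep ++ c ++ js, false)

def pvGaps (cols : List String) (x js : String) : List String :=
  let st := cols.foldl (pvGapsStep x js) (([], "", true) : List String × String × Bool)
  st.1 ++ [st.2.1]

def fanned_out_tpls_from_id_alt (cols : List String) (j : Int) (m : Int) : List String :=
  let js := PySem.Int.toStr j
  let gaps_of := cols.foldl (fun (d : PySem.Dict String (List String)) x =>
    if d.contains x then d else d.insert x (pvGaps cols x js)) PySem.Dict.empty
  (PySem.List.pyRange 0 m 1).foldl (fun out i =>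
    let si := PySem.Int.toStr i
    cols.foldl (fun out x =>
      PySem.Set.add out (PySem.Str.join (x ++ si) (gaps_of.getD x []))) out)
    PySem.Set.empty

-- ===== PRECONDITION & SPEC =====
def Spec_fanned_out_tpls_from_id (cols : List String) (j : Int) (m : Int) (out : List String) : Prop := out = fanned_out_tpls_from_id_alt cols j m
instance (cols : List String) (j : Int) (m : Int) (out : List String) : Decidable (Spec_fanned_out_tpls_from_id cols j m out) := by unfold Spec_fanned_out_tpls_from_id; infer_instance

-- ===== CLAIM (what is proved, stated in full; the proofs are below) =====
def Claim_equal_fanned_out_tpls_from_id : Prop := ∀ (cols : List String) (j : Int) (m : Int), Dom_fanned_out_tpls_from_id cols j m → Spec_fanned_out_tpls_from_id cols j m (fanned_out_tpls_from_id cols j m)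

-- ===== LEMMAS AND PROOFS =====

-- the tail of a row (everything after the pieces already accumulated), at the char level
def pvTailC (x js t : String) : List String → Bool → List Char
  | [], _ => []
  | c :: cs, first =>
    (if first then [] else [',']) ++
    (if c == x then t.toList else c.toList ++ js.toList) ++ pvTailC x js t cs false

theorem pvJoinC_last_append (sep q r : List Char) : ∀ (ps : List (List Char)),
    PySem.Chars.join sep (ps ++ [q ++ r]) = PySem.Chars.join sep (ps ++ [q]) ++ r := by
  intro ps
  induction ps with
  | nil => simp [PySem.Chars.join_singleton]
  | cons p ps ih =>
    cases ps with
    | nil =>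
      simp [PySem.Chars.join_cons_cons, PySem.Chars.join_singleton, List.append_assoc]
    | cons p' ps' =>
      simp only [List.cons_append, PySem.Chars.join_cons_cons] at ih ⊢
      rw [ih]
      simp [List.append_assoc]

theorem pvJoinC_snoc (sep r : List Char) : ∀ (ps : List (List Char)), ps ≠ [] →
    PySem.Chars.join sep (ps ++ [r]) = PySem.Chars.join sep ps ++ sep ++ r := by
  intro ps
  induction ps with
  | nil => intro h; exact absurd rfl h
  | cons p ps ih =>
    intro _
    cases ps with
    | nil => simp [PySem.Chars.join_cons_cons, PySem.Chars.join_singleton]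
    | cons p' ps' =>
      simp only [List.cons_append, PySem.Chars.join_cons_cons] at ih ⊢
      rw [ih (by simp)]
      simp [List.append_assoc]

theorem pvGaps_run_inv (x js si : String) :
    ∀ (rest : List String) (done : List String) (cur : String) (first : Bool),
    PySem.Chars.join (x.toList ++ si.toList)
      (((rest.foldl (pvGapsStep x js) (done, cur, first)).1
        ++ [(rest.foldl (pvGapsStep x js) (done, cur, first)).2.1]).map String.toList)
    = PySem.Chars.join (x.toList ++ si.toList) ((done ++ [cur]).map String.toList)
      ++ pvTailC x js (x ++ si) rest first := by
  have key : ∀ (done : List String) (cur add : String),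
      PySem.Chars.join (x.toList ++ si.toList) (((done ++ [cur ++ add]).map String.toList))
      = PySem.Chars.join (x.toList ++ si.toList) (((done ++ [cur]).map String.toList)) ++ add.toList := by
    intro done cur add
    simp only [List.map_append, List.map_cons, List.map_nil, String.toList_append]
    exact pvJoinC_last_append _ cur.toList add.toList (done.map String.toList)
  have key2 : ∀ (done : List String) (cur : String),
      PySem.Chars.join (x.toList ++ si.toList) ((((done ++ [cur]) ++ [""]).map String.toList))
      = PySem.Chars.join (x.toList ++ si.toList) (((done ++ [cur]).map String.toList))
        ++ (x.toList ++ si.toList) := by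
    intro done cur
    have h := pvJoinC_snoc (x.toList ++ si.toList) ([] : List Char)
      ((done ++ [cur]).map String.toList) (by simp)
    simpa using h
  intro rest
  induction rest with
  | nil => intro done cur first; simp [pvTailC]
  | cons c cs ih =>
    intro done cur first
    simp only [List.foldl_cons, pvGapsStep]
    by_cases h : (c == x) = true
    · simp only [h, if_true]
      rw [ih]
      rw [key2, key]
      simp only [pvTailC, h, if_true, String.toList_append]
      cases first <;> simp [List.append_assoc]
    · simp only [h, Bool.false_eq_true, if_false]
      rw [ih]
      have : cur ++ (if first then "" else ",") ++ c ++ js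
          = cur ++ ((if first then "" else ",") ++ c ++ js) := by
        simp [String.append_assoc]
      rw [this, key]
      simp only [pvTailC, h, Bool.false_eq_true, if_false, String.toList_append]
      cases first <;> simp [List.append_assoc]

theorem pvTailC_eq_join (x js si : String) : ∀ (cols : List String),
    PySem.Chars.join [','] (cols.map (fun c =>
      (if c == x then x ++ si else c ++ js).toList))
    = pvTailC x js (x ++ si) cols true := by
  have tailF : ∀ (c : String) (cs : List String),
      pvTailC x js (x ++ si) (c :: cs) false = [','] ++ pvTailC x js (x ++ si) (c :: cs) true := by
    intro c cs; simp [pvTailC]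
  intro cols
  induction cols with
  | nil => simp [pvTailC, PySem.Chars.join_nil]
  | cons c cs ih =>
    cases cs with
    | nil =>
      simp only [List.map_cons, List.map_nil, PySem.Chars.join_singleton, pvTailC]
      by_cases h : (c == x) = true <;> simp [h]
    | cons d ds =>
      simp only [List.map_cons, PySem.Chars.join_cons_cons]
      simp only [List.map_cons] at ih
      rw [ih, List.append_assoc, ← tailF d ds]
      simp only [pvTailC, String.toList_append]
      by_cases h : (c == x) = true <;> simp [h, List.append_assoc]

theorem pvRow_eq (cols : List String) (x js si : String) :
    PySem.Str.join (x ++ si) (pvGaps cols x js)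
    = PySem.Str.join "," (cols.map (fun c => if x == c then c ++ si else c ++ js)) := by
  apply String.toList_inj.mp
  rw [PySem.Str.toList_join, PySem.Str.toList_join]
  have hmap : (cols.map (fun c => if x == c then c ++ si else c ++ js)).map String.toList
      = cols.map (fun c => (if c == x then x ++ si else c ++ js).toList) := by
    rw [List.map_map]
    apply List.map_congr_left
    intro c _
    by_cases h : x = c
    · subst h; simp
    · have h1 : (x == c) = false := by simp [h]
      have h2 : (c == x) = false := beq_eq_false_iff_ne.mpr (Ne.symm h)
      simp [Function.comp, h1, h2]
  rw [hmap, show ("," : String).toList = [','] from rfl, pvTailC_eq_join x js si cols]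
  have h := pvGaps_run_inv x js si cols [] "" true
  simp only [pvGaps, String.toList_append]
  rw [h]
  simp [PySem.Chars.join_singleton]

theorem pvDict_getD (cols : List String) (js : String) :
    ∀ (l : List String) (d : PySem.Dict String (List String)),
    (∀ y, d.contains y = true → d.getD y [] = pvGaps cols y js) →
    ∀ x, (x ∈ l ∨ d.contains x = true) →
    (l.foldl (fun d x => if d.contains x then d else d.insert x (pvGaps cols x js)) d).getD x []
      = pvGaps cols x js := by
  intro l
  induction l with
  | nil => intro d hd x hx; exact hd x (hx.resolve_left (by simp))
  | cons a t ih =>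
    intro d hd x hx
    simp only [List.foldl_cons]
    by_cases hc : d.contains a = true
    · simp only [hc, if_true]
      refine ih d hd x ?_
      rcases hx with hx | hx
      · rcases List.mem_cons.mp hx with rfl | hx
        · exact Or.inr hc
        · exact Or.inl hx
      · exact Or.inr hx
    · refine ih _ ?_ x ?_
      · intro y hy
        simp only [hc, Bool.false_eq_true, if_false] at hy ⊢
        rw [PySem.Dict.contains_insert] at hy
        rw [PySem.Dict.getD_insert]
        by_cases hya : y = a
        · simp [hya]
        · simp only [hya, if_false]
          exact hd y (by simpa [hya] using hy)
      · rcases hx with hx | hx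
        · rcases List.mem_cons.mp hx with rfl | hx
          · exact Or.inr (by simp [hc])
          · exact Or.inl hx
        · exact Or.inr (by simp [hc, PySem.Dict.contains_insert, hx])

-- ===== VERDICT (by name: the statement is the Claim_ definition above) =====
theorem pvSides_eq (cols : List String) (j m : Int) :
    fanned_out_tpls_from_id cols j m = fanned_out_tpls_from_id_alt cols j m := by
  unfold fanned_out_tpls_from_id fanned_out_tpls_from_id_alt
  simp only [PySem.List.foldl_append_singleton_eq_map, List.nil_append,
    PySem.List.foldl_append_eq_flatMap, PySem.Set.ofList_eq_foldl, List.foldl_flatMap]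
  apply PySem.List.foldl_congr_mem
  intro acc i _
  rw [List.foldl_map]
  apply PySem.List.foldl_congr_mem
  intro acc2 x hx
  have hd := pvDict_getD cols (PySem.Int.toStr j) cols PySem.Dict.empty
    (by intro y hy; simp [PySem.Dict.empty, PySem.Dict.contains] at hy) x (Or.inl hx)
  rw [hd, pvRow_eq cols x (PySem.Int.toStr j) (PySem.Int.toStr i)]

-- ===== VERDICT (by name: the statement is the Claim_ definition above) =====
theorem fanned_out_tpls_from_id_spec : Claim_equal_fanned_out_tpls_from_id := by
  intro cols j m _
  unfold Spec_fanned_out_tpls_from_id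
  exact pvSides_eq cols j m
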